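-- pv_equiv track=rewrite | github.com/mattgonzalesced/CED_Extensions | AE pyTools.extension/AE pyTools.Tab/MEP Automation.panel/Space Operations.pulldown/Place Space Elements.pushbutton/script.py | _lookup_assignment
-- ===== SOURCE A (Python) =====
-- def _normalize_text(value):
--     return " ".join(str(value or "").strip().lower().split())
--
-- def _lookup_assignment(assignments, space_id, unique_id, space_number=None, space_name=None, allow_space_id_direct=True):
--     if not isinstance(assignments, dict):
--         return None
--
--     uid = (unique_id or "").strip()
--     sid = (space_id or "").strip()
--
--     if uid and uid in assignments and isinstance(assignments.get(uid), dict):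
--         return assignments.get(uid)
--     if allow_space_id_direct and sid and sid in assignments and isinstance(assignments.get(sid), dict):
--         return assignments.get(sid)
--
--     values = [value for value in assignments.values() if isinstance(value, dict)]
--
--     for value in values:
--         entry_uid = str(value.get("unique_id") or "").strip()
--         entry_sid = str(value.get("space_id") or "").strip()
--         if uid and entry_uid and uid == entry_uid:
--             return value
--         if allow_space_id_direct and sid and entry_sid and sid == entry_sid:
--             return value
--
--     target_number = _normalize_text(space_number)
--     target_name = _normalize_text(space_name)
--     if not target_number and not target_name:
--         return None
--
--     exact_both = []
--     number_matches = []
--     name_matches = []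
--
--     for value in values:
--         value_number = _normalize_text(value.get("space_number"))
--         value_name = _normalize_text(value.get("space_name"))
--
--         if target_number and value_number and target_number == value_number:
--             number_matches.append(value)
--         if target_name and value_name and target_name == value_name:
--             name_matches.append(value)
--         if target_number and target_name and value_number == target_number and value_name == target_name:
--             exact_both.append(value)
--
--     if exact_both:
--         return exact_both[0]
--
--     if target_number and not target_name and len(number_matches) == 1:
--         return number_matches[0]
--     if target_name and not target_number and len(name_matches) == 1:
--         return name_matches[0]
--
--     best = None
--     best_score = 0
--     for value in values:
--         value_number = _normalize_text(value.get("space_number"))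
--         value_name = _normalize_text(value.get("space_name"))
--
--         score = 0
--         if target_number and value_number and target_number == value_number:
--             score += 2
--         if target_name and value_name and target_name == value_name:
--             score += 1
--
--         if score > best_score:
--             best = value
--             best_score = score
--             if score >= 3:
--                 break
--
--     return best
-- ===== SOURCE B (Python) =====
-- def _normalize_text(value):
--     return " ".join(str(value or "").strip().lower().split())
--
-- def _lookup_assignment(assignments, space_id, unique_id, space_number=None, space_name=None, allow_space_id_direct=True):
--     if not isinstance(assignments, dict):
--         return None
--
--     uid = (unique_id or "").strip()
--     sid = (space_id or "").strip()
--
--     if uid and uid in assignments and isinstance(assignments.get(uid), dict):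
--         return assignments.get(uid)
--     if allow_space_id_direct and sid and sid in assignments and isinstance(assignments.get(sid), dict):
--         return assignments.get(sid)
--
--     values = [value for value in assignments.values() if isinstance(value, dict)]
--
--     for value in values:
--         entry_uid = str(value.get("unique_id") or "").strip()
--         entry_sid = str(value.get("space_id") or "").strip()
--         if uid and entry_uid and uid == entry_uid:
--             return value
--         if allow_space_id_direct and sid and entry_sid and sid == entry_sid:
--             return value
--
--     target_number = _normalize_text(space_number)
--     target_name = _normalize_text(space_name)
--     if not target_number and not target_name:
--         return None
--
--     # Single pass keeping only the FIRST match of each kind; the list building,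
--     # the len==1 shortcuts and the scoring loop of the original collapse into
--     # the cascade both -> number -> name.
--     first_both = first_number = first_name = None
--     for value in values:
--         num_hit = bool(target_number) and _normalize_text(value.get("space_number")) == target_number
--         name_hit = bool(target_name) and _normalize_text(value.get("space_name")) == target_name
--         if first_number is None and num_hit:
--             first_number = value
--         if first_name is None and name_hit:
--             first_name = value
--         if first_both is None and num_hit and name_hit:
--             first_both = value
--
--     if first_both is not None:
--         return first_both
--     if first_number is not None:
--         return first_number
--     return first_name
-- ===== Notes on version B (the rewrite author's own statement) =====
-- stated objective: simpler
-- what changed: Replaces A's three accumulated match lists, the two len==1 shortcut branches and the separate score-based best loop by a single pass that keeps only the first both/number/name hit and a cascade both -> number -> name, which provably equals A's scoring result.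
import Mathlib
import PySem

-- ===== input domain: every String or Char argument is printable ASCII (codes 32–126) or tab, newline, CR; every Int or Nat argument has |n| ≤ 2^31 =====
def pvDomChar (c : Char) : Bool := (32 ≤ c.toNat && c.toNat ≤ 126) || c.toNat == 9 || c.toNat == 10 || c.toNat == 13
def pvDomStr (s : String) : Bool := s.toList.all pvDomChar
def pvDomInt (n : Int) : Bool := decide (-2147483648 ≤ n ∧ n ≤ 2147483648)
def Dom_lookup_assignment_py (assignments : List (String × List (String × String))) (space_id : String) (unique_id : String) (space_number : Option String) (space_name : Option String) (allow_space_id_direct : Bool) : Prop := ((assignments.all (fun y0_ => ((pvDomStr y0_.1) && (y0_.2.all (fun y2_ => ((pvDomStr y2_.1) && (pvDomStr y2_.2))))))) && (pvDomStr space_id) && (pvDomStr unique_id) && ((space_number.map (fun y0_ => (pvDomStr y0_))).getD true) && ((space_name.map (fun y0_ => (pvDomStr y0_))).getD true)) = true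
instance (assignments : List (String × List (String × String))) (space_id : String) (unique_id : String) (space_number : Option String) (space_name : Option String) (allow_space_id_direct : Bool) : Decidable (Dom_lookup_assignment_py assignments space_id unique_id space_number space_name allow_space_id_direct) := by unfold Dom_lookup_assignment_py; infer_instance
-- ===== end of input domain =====

-- B replaces A's three match lists, the len==1 shortcuts and the separate scoring loop by one
-- pass that keeps only the first match of each kind, cascaded both -> number -> name (simpler).

-- ===== PORT A =====
-- shared module helper _normalize_text(value) = " ".join(str(value or "").strip().lower().split())
def pyNormalizeText (s : String) : String :=
  PySem.Str.join " " (PySem.Str.split₀ (PySem.Str.lower (PySem.Str.strip s)))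

def pyNormOptText (v : Option String) : String := pyNormalizeText (v.getD "")

-- the caller's Python dicts, rebuilt from the assoc lists of the type convention
-- (duplicate keys overwrite, insertion order kept — exactly dict(...))
def pyDictify (assignments : List (String × List (String × String))) :
    PySem.Dict String (PySem.Dict String String) :=
  PySem.Dict.ofList (assignments.map (fun p => (p.1, PySem.Dict.ofList p.2)))

-- str(value.get(k) or "")
def fieldStr (v : PySem.Dict String String) (k : String) : String := v.getD k ""

-- the for-value loop over values returning the first uid/sid hit (shared by A and B's Python)
def idScanPred (uid sid : String) (allow : Bool) (v : PySem.Dict String String) : Bool :=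
  (uid != "" && PySem.Str.strip (fieldStr v "unique_id") != "" &&
      uid == PySem.Str.strip (fieldStr v "unique_id")) ||
  (allow && sid != "" && PySem.Str.strip (fieldStr v "space_id") != "" &&
      sid == PySem.Str.strip (fieldStr v "space_id"))

-- A's second phase: build number_matches / name_matches / exact_both, then the
-- len==1 shortcuts, then the score-based best loop.
def stepA (tn tm : String)
    (acc : List (PySem.Dict String String) × List (PySem.Dict String String) ×
           List (PySem.Dict String String)) (v : PySem.Dict String String) :
    List (PySem.Dict String String) × List (PySem.Dict String String) ×
    List (PySem.Dict String String) :=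
  let vn := pyNormalizeText (fieldStr v "space_number")
  let vm := pyNormalizeText (fieldStr v "space_name")
  let number_matches := if tn != "" && vn != "" && tn == vn then acc.1 ++ [v] else acc.1
  let name_matches := if tm != "" && vm != "" && tm == vm then acc.2.1 ++ [v] else acc.2.1
  let exact_both := if tn != "" && tm != "" && vn == tn && vm == tm then acc.2.2 ++ [v]
    else acc.2.2
  (number_matches, name_matches, exact_both)

def scoreLoopA (tn tm : String) :
    List (PySem.Dict String String) → Option (PySem.Dict String String) → Nat →
    Option (PySem.Dict String String)
  | [], best, _ => best
  | v :: rest, best, best_score =>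
    let vn := pyNormalizeText (fieldStr v "space_number")
    let vm := pyNormalizeText (fieldStr v "space_name")
    let score := (if tn != "" && vn != "" && tn == vn then 2 else 0) +
                 (if tm != "" && vm != "" && tm == vm then 1 else 0)
    if best_score < score then
      (if 3 ≤ score then some v else scoreLoopA tn tm rest (some v) score)
    else scoreLoopA tn tm rest best best_score

def phase3A (values : List (PySem.Dict String String)) (tn tm : String) :
    Option (PySem.Dict String String) :=
  let acc := values.foldl (stepA tn tm) ([], [], [])
  match acc.2.2 with
  | e :: _ => some e
  | [] =>
    if tn != "" && tm == "" && acc.1.length == 1 then acc.1.head?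
    else if tm != "" && tn == "" && acc.2.1.length == 1 then acc.2.1.head?
    else scoreLoopA tn tm values none 0

def lookup_assignment_py (assignments : List (String × List (String × String))) (space_id : String) (unique_id : String) (space_number : Option String) (space_name : Option String) (allow_space_id_direct : Bool) : Option (List (String × String)) :=
  let d := pyDictify assignments
  let uid := PySem.Str.strip unique_id
  let sid := PySem.Str.strip space_id
  if uid != "" && (d.get? uid).isSome then (d.get? uid).map PySem.Dict.items
  else if allow_space_id_direct && sid != "" && (d.get? sid).isSome then
    (d.get? sid).map PySem.Dict.items
  else
    let values := d.values
    match values.find? (idScanPred uid sid allow_space_id_direct) with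
    | some v => some v.items
    | none =>
      let tn := pyNormOptText space_number
      let tm := pyNormOptText space_name
      if tn == "" && tm == "" then none
      else (phase3A values tn tm).map PySem.Dict.items

-- ===== PORT B =====
-- B's second phase: one pass keeping the first both/number/name hit, then the cascade.
def stepB (tn tm : String)
    (acc : Option (PySem.Dict String String) × Option (PySem.Dict String String) ×
           Option (PySem.Dict String String)) (v : PySem.Dict String String) :
    Option (PySem.Dict String String) × Option (PySem.Dict String String) ×
    Option (PySem.Dict String String) :=
  let num_hit := tn != "" && pyNormalizeText (fieldStr v "space_number") == tn
  let name_hit := tm != "" && pyNormalizeText (fieldStr v "space_name") == tm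
  let first_number := if acc.1.isNone && num_hit then some v else acc.1
  let first_name := if acc.2.1.isNone && name_hit then some v else acc.2.1
  let first_both := if acc.2.2.isNone && (num_hit && name_hit) then some v else acc.2.2
  (first_number, first_name, first_both)

def phase3B (values : List (PySem.Dict String String)) (tn tm : String) :
    Option (PySem.Dict String String) :=
  let acc := values.foldl (stepB tn tm) (none, none, none)
  match acc.2.2 with
  | some v => some v
  | none =>
    match acc.1 with
    | some v => some v
    | none => acc.2.1

def lookup_assignment_py_alt (assignments : List (String × List (String × String))) (space_id : String) (unique_id : String) (space_number : Option String) (space_name : Option String) (allow_space_id_direct : Bool) : Option (List (String × String)) :=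
  let d := pyDictify assignments
  let uid := PySem.Str.strip unique_id
  let sid := PySem.Str.strip space_id
  if uid != "" && (d.get? uid).isSome then (d.get? uid).map PySem.Dict.items
  else if allow_space_id_direct && sid != "" && (d.get? sid).isSome then
    (d.get? sid).map PySem.Dict.items
  else
    let values := d.values
    match values.find? (idScanPred uid sid allow_space_id_direct) with
    | some v => some v.items
    | none =>
      let tn := pyNormOptText space_number
      let tm := pyNormOptText space_name
      if tn == "" && tm == "" then none
      else (phase3B values tn tm).map PySem.Dict.items

-- ===== PRECONDITION & SPEC =====
def Spec_lookup_assignment_py (assignments : List (String × List (String × String))) (space_id : String) (unique_id : String) (space_number : Option String) (space_name : Option String) (allow_space_id_direct : Bool) (out : Option (List (String × String))) : Prop := out = lookup_assignment_py_alt assignments space_id unique_id space_number space_name allow_space_id_direct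
instance (assignments : List (String × List (String × String))) (space_id : String) (unique_id : String) (space_number : Option String) (space_name : Option String) (allow_space_id_direct : Bool) (out : Option (List (String × String))) : Decidable (Spec_lookup_assignment_py assignments space_id unique_id space_number space_name allow_space_id_direct out) := by unfold Spec_lookup_assignment_py; infer_instance

-- ===== CLAIM (what is proved, stated in full; the proofs are below) =====
def Claim_equal_lookup_assignment_py : Prop := ∀ (assignments : List (String × List (String × String))) (space_id : String) (unique_id : String) (space_number : Option String) (space_name : Option String) (allow_space_id_direct : Bool), Dom_lookup_assignment_py assignments space_id unique_id space_number space_name allow_space_id_direct → Spec_lookup_assignment_py assignments space_id unique_id space_number space_name allow_space_id_direct (lookup_assignment_py assignments space_id unique_id space_number space_name allow_space_id_direct)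

-- ===== LEMMAS AND PROOFS =====

-- canonical hit predicates (B's guard form)
def pnum (tn : String) (v : PySem.Dict String String) : Bool :=
  tn != "" && pyNormalizeText (fieldStr v "space_number") == tn
def pname (tm : String) (v : PySem.Dict String String) : Bool :=
  tm != "" && pyNormalizeText (fieldStr v "space_name") == tm

lemma guardA_num (tn : String) (v : PySem.Dict String String) :
    (tn != "" && pyNormalizeText (fieldStr v "space_number") != "" &&
      tn == pyNormalizeText (fieldStr v "space_number")) = pnum tn v := by
  by_cases h : pyNormalizeText (fieldStr v "space_number") = tn
  · simp [pnum, h]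
  · have hb : (tn == pyNormalizeText (fieldStr v "space_number")) = false :=
      beq_eq_false_iff_ne.mpr (fun hh => h hh.symm)
    have hb' : (pyNormalizeText (fieldStr v "space_number") == tn) = false :=
      beq_eq_false_iff_ne.mpr h
    simp [pnum, hb, hb']

lemma guardA_name (tm : String) (v : PySem.Dict String String) :
    (tm != "" && pyNormalizeText (fieldStr v "space_name") != "" &&
      tm == pyNormalizeText (fieldStr v "space_name")) = pname tm v := by
  by_cases h : pyNormalizeText (fieldStr v "space_name") = tm
  · simp [pname, h]
  · have hb : (tm == pyNormalizeText (fieldStr v "space_name")) = false :=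
      beq_eq_false_iff_ne.mpr (fun hh => h hh.symm)
    have hb' : (pyNormalizeText (fieldStr v "space_name") == tm) = false :=
      beq_eq_false_iff_ne.mpr h
    simp [pname, hb, hb']

lemma guardA_both (tn tm : String) (v : PySem.Dict String String) :
    (tn != "" && tm != "" && pyNormalizeText (fieldStr v "space_number") == tn &&
      pyNormalizeText (fieldStr v "space_name") == tm) = (pnum tn v && pname tm v) := by
  simp only [pnum, pname]
  by_cases h1 : pyNormalizeText (fieldStr v "space_number") == tn <;>
  by_cases h2 : pyNormalizeText (fieldStr v "space_name") == tm <;>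
    simp [h1, h2, Bool.and_comm, Bool.and_left_comm]

lemma head?_filter_eq_find? {α : Type} (p : α → Bool) (xs : List α) :
    (xs.filter p).head? = xs.find? p := by
  induction xs with
  | nil => rfl
  | cons x xs ih => by_cases h : p x <;> simp [List.filter_cons, List.find?_cons, h, ih]

lemma stepA_eq (tn tm : String)
    (acc : List (PySem.Dict String String) × List (PySem.Dict String String) ×
           List (PySem.Dict String String)) (v : PySem.Dict String String) :
    stepA tn tm acc v =
      (if pnum tn v then acc.1 ++ [v] else acc.1,
       if pname tm v then acc.2.1 ++ [v] else acc.2.1,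
       if pnum tn v && pname tm v then acc.2.2 ++ [v] else acc.2.2) := by
  simp only [stepA, guardA_num, guardA_name, guardA_both]

lemma foldA_eq (tn tm : String) (values : List (PySem.Dict String String))
    (a b c : List (PySem.Dict String String)) :
    values.foldl (stepA tn tm) (a, b, c)
    = (a ++ values.filter (pnum tn), b ++ values.filter (pname tm),
       c ++ values.filter (fun v => pnum tn v && pname tm v)) := by
  induction values generalizing a b c with
  | nil => simp
  | cons v vs ih =>
    rw [List.foldl_cons, stepA_eq]
    by_cases h1 : pnum tn v <;> by_cases h2 : pname tm v <;>
      simp [h1, h2, ih, List.filter_cons]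

lemma stepB_eq (tn tm : String)
    (acc : Option (PySem.Dict String String) × Option (PySem.Dict String String) ×
           Option (PySem.Dict String String)) (v : PySem.Dict String String) :
    stepB tn tm acc v =
      (if acc.1.isNone && pnum tn v then some v else acc.1,
       if acc.2.1.isNone && pname tm v then some v else acc.2.1,
       if acc.2.2.isNone && (pnum tn v && pname tm v) then some v else acc.2.2) := rfl

lemma foldB_eq (tn tm : String) (values : List (PySem.Dict String String))
    (o1 o2 o3 : Option (PySem.Dict String String)) :
    values.foldl (stepB tn tm) (o1, o2, o3)
    = (o1.or (values.find? (pnum tn)), o2.or (values.find? (pname tm)),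
       o3.or (values.find? (fun v => pnum tn v && pname tm v))) := by
  induction values generalizing o1 o2 o3 with
  | nil => cases o1 <;> cases o2 <;> cases o3 <;> rfl
  | cons v vs ih =>
    rw [List.foldl_cons, stepB_eq]
    cases o1 <;> cases o2 <;> cases o3 <;>
      by_cases h1 : pnum tn v <;> by_cases h2 : pname tm v <;>
        simp [h1, h2, ih, List.find?_cons, Option.or]

-- the score loop once no value matches both targets
lemma scoreLoopA_two (tn tm : String) (values : List (PySem.Dict String String))
    (v : PySem.Dict String String)
    (h : ∀ w ∈ values, ¬(pnum tn w && pname tm w)) :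
    scoreLoopA tn tm values (some v) 2 = some v := by
  induction values with
  | nil => rfl
  | cons w vs ih =>
    have hw := h w (by simp)
    have hrest : ∀ u ∈ vs, ¬(pnum tn u && pname tm u) = true := fun u hu => h u (by simp [hu])
    simp only [scoreLoopA, guardA_num, guardA_name]
    by_cases h1 : pnum tn w <;> by_cases h2 : pname tm w <;>
      simp_all [ih hrest]

lemma scoreLoopA_one (tn tm : String) (values : List (PySem.Dict String String))
    (v : PySem.Dict String String)
    (h : ∀ w ∈ values, ¬(pnum tn w && pname tm w)) :
    scoreLoopA tn tm values (some v) 1 = (values.find? (pnum tn)).or (some v) := by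
  induction values generalizing v with
  | nil => rfl
  | cons w vs ih =>
    have hw := h w (by simp)
    have hrest : ∀ u ∈ vs, ¬(pnum tn u && pname tm u) = true := fun u hu => h u (by simp [hu])
    simp only [scoreLoopA, guardA_num, guardA_name, List.find?_cons]
    by_cases h1 : pnum tn w <;> by_cases h2 : pname tm w <;>
      simp_all [scoreLoopA_two tn tm vs w hrest, ih v hrest, Option.or]

lemma scoreLoopA_zero (tn tm : String) (values : List (PySem.Dict String String))
    (h : ∀ w ∈ values, ¬(pnum tn w && pname tm w)) :
    scoreLoopA tn tm values none 0 =
      (values.find? (pnum tn)).or (values.find? (pname tm)) := by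
  induction values with
  | nil => rfl
  | cons w vs ih =>
    have hw := h w (by simp)
    have hrest : ∀ u ∈ vs, ¬(pnum tn u && pname tm u) = true := fun u hu => h u (by simp [hu])
    simp only [scoreLoopA, guardA_num, guardA_name, List.find?_cons]
    by_cases h1 : pnum tn w <;> by_cases h2 : pname tm w <;>
      simp_all [scoreLoopA_two tn tm vs w hrest, scoreLoopA_one tn tm vs w hrest,
        ih hrest, Option.or]

lemma phase3_eq (values : List (PySem.Dict String String)) (tn tm : String) :
    phase3A values tn tm = phase3B values tn tm := by
  unfold phase3A phase3B
  simp only [foldA_eq, foldB_eq, List.nil_append, Option.none_or]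
  by_cases hboth : values.filter (fun v => pnum tn v && pname tm v) = []
  case neg =>
    -- a both-match exists: A returns exact_both[0], B's cascade starts with it
    cases hf : values.filter (fun v => pnum tn v && pname tm v) with
    | nil => exact absurd hf hboth
    | cons e rest =>
      have he : values.find? (fun v => pnum tn v && pname tm v) = some e := by
        rw [← head?_filter_eq_find?, hf]; rfl
      simp only [hf, he]
  case pos =>
    have hfboth : values.find? (fun v => pnum tn v && pname tm v) = none := by
      rw [← head?_filter_eq_find?, hboth]; rfl
    have hnb : ∀ w ∈ values, ¬(pnum tn w && pname tm w) := by
      intro w hw hcontra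
      have : w ∈ values.filter (fun v => pnum tn v && pname tm v) :=
        List.mem_filter.2 ⟨hw, hcontra⟩
      simp [hboth] at this
    simp only [hboth, hfboth]
    by_cases s1 : (tn != "" && tm == "" && (values.filter (pnum tn)).length == 1) = true
    · -- number-only shortcut: no name match exists, head of filter = find?
      rw [if_pos s1]
      simp only [Bool.and_eq_true] at s1
      have htm : tm = "" := by simpa using s1.1.2
      have hfname : values.find? (pname tm) = none :=
        List.find?_eq_none.mpr (fun w _ => by simp [pname, htm])
      rw [hfname, ← head?_filter_eq_find?]
      cases hh : (values.filter (pnum tn)).head? <;> simp [hh]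
    · rw [if_neg s1]
      by_cases s2 : (tm != "" && tn == "" && (values.filter (pname tm)).length == 1) = true
      · -- name-only shortcut: no number match exists
        rw [if_pos s2]
        simp only [Bool.and_eq_true] at s2
        have htn : tn = "" := by simpa using s2.1.2
        have hfnum : values.find? (pnum tn) = none :=
          List.find?_eq_none.mpr (fun w _ => by simp [pnum, htn])
        rw [hfnum, ← head?_filter_eq_find?]
      · rw [if_neg s2, scoreLoopA_zero tn tm values hnb]
        cases hh : values.find? (pnum tn) <;> simp [hh, Option.or]

-- ===== VERDICT (by name: the statement is the Claim_ definition above) =====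
theorem lookup_assignment_py_spec : Claim_equal_lookup_assignment_py := by
  intro assignments space_id unique_id space_number space_name allow _
  unfold Spec_lookup_assignment_py lookup_assignment_py lookup_assignment_py_alt
  simp only [phase3_eq]
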